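-- pv_equiv track=rewrite | github.com/LI-SUJU/TextMining_A2_2.0 | Text_Mining2.py | compute_metrics_for_each_entity
-- ===== SOURCE A (Python) =====
-- from collections import Counter
--
-- def compute_metrics_for_each_entity(predictions, references):
--     tp, fp, fn = Counter(), Counter(), Counter()
--
--     for pred_seq, ref_seq in zip(predictions, references):
--         for pred, ref in zip(pred_seq, ref_seq):
--             if ref != "O" and pred != "O":
--                 entity_ref = ref.split("-")[1]
--                 entity_pred = pred.split("-")[1]
--                 if entity_pred == entity_ref:
--                     tp[entity_ref] += 1  # True Positive
--                 else:
--                     fp[entity_pred] += 1  # False Positive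
--                     fn[entity_ref] += 1  # False Negative
--             elif ref != "O" and pred == "O":
--                 entity_ref = ref.split("-")[1]
--                 fn[entity_ref] += 1  # False Negative
--             elif ref == "O" and pred != "O":
--                 entity_pred = pred.split("-")[1]
--                 fp[entity_pred] += 1  # False Positive
--     return tp, fp, fn
-- ===== SOURCE B (Python) =====
-- from collections import Counter
--
--
-- def compute_metrics_for_each_entity(predictions, references):
--     pairs = [(p, r) for pred_seq, ref_seq in zip(predictions, references)
--                     for p, r in zip(pred_seq, ref_seq)]
--     tp = Counter(r.split("-")[1] for p, r in pairs
--                  if p != "O" and r != "O" and p.split("-")[1] == r.split("-")[1])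
--     fp = Counter(p.split("-")[1] for p, r in pairs
--                  if p != "O" and (r == "O" or p.split("-")[1] != r.split("-")[1]))
--     fn = Counter(r.split("-")[1] for p, r in pairs
--                  if r != "O" and (p == "O" or p.split("-")[1] != r.split("-")[1]))
--     return tp, fp, fn
-- ===== Notes on version B (the rewrite author's own statement) =====
-- stated objective: alternative
-- what changed: A's single nested loop with branch-based increments into three counters is replaced by flattening the zipped sequences once and building tp/fp/fn as three independent Counter(...) comprehension passes, each with its own event predicate; Pre_ excludes only inputs where both programs raise IndexError (a non-'O' label without '-').
import Mathlib
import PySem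

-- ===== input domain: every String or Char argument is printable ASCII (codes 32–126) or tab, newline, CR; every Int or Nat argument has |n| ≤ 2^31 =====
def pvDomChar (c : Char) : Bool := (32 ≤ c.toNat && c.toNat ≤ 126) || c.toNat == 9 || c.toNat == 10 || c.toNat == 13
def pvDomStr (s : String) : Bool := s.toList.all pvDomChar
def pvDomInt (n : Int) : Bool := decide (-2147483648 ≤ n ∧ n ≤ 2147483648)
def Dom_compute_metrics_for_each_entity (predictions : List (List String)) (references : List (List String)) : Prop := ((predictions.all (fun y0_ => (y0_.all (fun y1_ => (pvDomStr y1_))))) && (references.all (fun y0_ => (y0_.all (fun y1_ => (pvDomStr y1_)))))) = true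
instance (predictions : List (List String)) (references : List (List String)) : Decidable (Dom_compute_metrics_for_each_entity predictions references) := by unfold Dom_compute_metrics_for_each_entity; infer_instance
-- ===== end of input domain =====

-- B builds the same three counters by three filtered Counter passes over the flattened pairs
-- instead of A's single branching loop (objective: alternative decomposition, same cost).
-- Where a non-'O' label has no '-', BOTH Pythons raise IndexError; Pre_ excludes exactly those inputs
-- (the total ports substitute "" for the impossible split('-')[1] there, which Pre_ keeps unreachable).

-- ===== PORT A =====
-- entity = label.split('-')[1]; total stand-in: split? "-" is always `some` (sep nonempty) and `.getD ""` is exact whenever the label contains '-' (guaranteed by Pre_)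
def pvEntityA (s : String) : String := (PySem.List.pyGet? ((PySem.Str.split? s "-").getD []) 1).getD ""

-- one increment of a Counter: c[k] += 1
def pvIncA (d : PySem.Dict String Int) (k : String) : PySem.Dict String Int := d.modify k 0 (· + 1)

-- the body of A's inner loop, on the state (tp, fp, fn) and one (pred, ref) pair, branches in A's order
def pvStepA (st : PySem.Dict String Int × PySem.Dict String Int × PySem.Dict String Int)
    (q : String × String) :
    PySem.Dict String Int × PySem.Dict String Int × PySem.Dict String Int :=
  if q.2 ≠ "O" ∧ q.1 ≠ "O" then
    let entity_ref := pvEntityA q.2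
    let entity_pred := pvEntityA q.1
    if entity_pred = entity_ref then (pvIncA st.1 entity_ref, st.2.1, st.2.2)
    else (st.1, pvIncA st.2.1 entity_pred, pvIncA st.2.2 entity_ref)
  else if q.2 ≠ "O" ∧ q.1 = "O" then (st.1, st.2.1, pvIncA st.2.2 (pvEntityA q.2))
  else if q.2 = "O" ∧ q.1 ≠ "O" then (st.1, pvIncA st.2.1 (pvEntityA q.1), st.2.2)
  else st

def compute_metrics_for_each_entity (predictions : List (List String)) (references : List (List String)) : (List (String × Int)) × (List (String × Int)) × (List (String × Int)) :=
  let r := (predictions.zip references).foldl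
    (fun st pr => (pr.1.zip pr.2).foldl pvStepA st)
    (PySem.Dict.empty, PySem.Dict.empty, PySem.Dict.empty)
  (r.1.items, r.2.1.items, r.2.2.items)

-- ===== PORT B =====
def pvEntityB (s : String) : String := (PySem.List.pyGet? ((PySem.Str.split? s "-").getD []) 1).getD ""

-- the three comprehension filters of Source B, as named predicates on one (pred, ref) pair
def pvIsTP (q : String × String) : Bool := q.1 != "O" && q.2 != "O" && (pvEntityB q.1 == pvEntityB q.2)
def pvIsFP (q : String × String) : Bool := q.1 != "O" && (q.2 == "O" || pvEntityB q.1 != pvEntityB q.2)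
def pvIsFN (q : String × String) : Bool := q.2 != "O" && (q.1 == "O" || pvEntityB q.1 != pvEntityB q.2)

def compute_metrics_for_each_entity_alt (predictions : List (List String)) (references : List (List String)) : (List (String × Int)) × (List (String × Int)) × (List (String × Int)) :=
  let pairs := (predictions.zip references).flatMap (fun pr => pr.1.zip pr.2)
  let tp := PySem.Dict.counter ((pairs.filter pvIsTP).map (fun q => pvEntityB q.2))
  let fp := PySem.Dict.counter ((pairs.filter pvIsFP).map (fun q => pvEntityB q.1))
  let fn := PySem.Dict.counter ((pairs.filter pvIsFN).map (fun q => pvEntityB q.2))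
  (tp.items, fp.items, fn.items)

-- ===== PRECONDITION & SPEC =====
-- Pre_ excludes exactly the inputs on which Python A raises IndexError: some aligned pair carries a
-- non-'O' label containing no '-' (split('-')[1] does not exist there; B raises the same IndexError).
def Pre_compute_metrics_for_each_entity (predictions : List (List String)) (references : List (List String)) : Prop :=
  ∀ pr ∈ predictions.zip references, ∀ q ∈ pr.1.zip pr.2,
    (q.1 ≠ "O" → '-' ∈ q.1.toList) ∧ (q.2 ≠ "O" → '-' ∈ q.2.toList)
instance (predictions : List (List String)) (references : List (List String)) : Decidable (Pre_compute_metrics_for_each_entity predictions references) := by unfold Pre_compute_metrics_for_each_entity; infer_instance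

def pvWitness_compute_metrics_for_each_entity : List (List String) × List (List String) :=
  ([["B-PER", "O", "B-LOC"]], [["I-PER", "B-ORG", "O"]])

def Spec_compute_metrics_for_each_entity (predictions : List (List String)) (references : List (List String)) (out : (List (String × Int)) × (List (String × Int)) × (List (String × Int))) : Prop := out = compute_metrics_for_each_entity_alt predictions references
instance (predictions : List (List String)) (references : List (List String)) (out : (List (String × Int)) × (List (String × Int)) × (List (String × Int))) : Decidable (Spec_compute_metrics_for_each_entity predictions references out) := by unfold Spec_compute_metrics_for_each_entity; infer_instance

-- ===== CLAIM (what is proved, stated in full; the proofs are below) =====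
def Claim_equal_compute_metrics_for_each_entity : Prop := ∀ (predictions : List (List String)) (references : List (List String)), Dom_compute_metrics_for_each_entity predictions references → Pre_compute_metrics_for_each_entity predictions references → Spec_compute_metrics_for_each_entity predictions references (compute_metrics_for_each_entity predictions references)

-- ===== LEMMAS AND PROOFS =====

theorem pvEnt_eq (s : String) : pvEntityB s = pvEntityA s := rfl

-- A's loop over any pair list equals three independent counting folds over the filtered event lists.
theorem pvMain (l : List (String × String))
    (tp fp fn : PySem.Dict String Int) :
    l.foldl pvStepA (tp, fp, fn) =
      ( ((l.filter pvIsTP).map (fun q => pvEntityA q.2)).foldl (fun d x => d.modify x 0 (· + 1)) tp,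
        ((l.filter pvIsFP).map (fun q => pvEntityA q.1)).foldl (fun d x => d.modify x 0 (· + 1)) fp,
        ((l.filter pvIsFN).map (fun q => pvEntityA q.2)).foldl (fun d x => d.modify x 0 (· + 1)) fn ) := by
  induction l generalizing tp fp fn with
  | nil => rfl
  | cons q t ih =>
    by_cases h1 : q.1 = "O" <;> by_cases h2 : q.2 = "O" <;>
      by_cases h3 : pvEntityA q.1 = pvEntityA q.2 <;>
      simp [pvStepA, pvIsTP, pvIsFP, pvIsFN, pvIncA, pvEnt_eq, h1, h2, h3, ih]

theorem pvFoldlFlatMap (ls : List (List String × List String))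
    (st : PySem.Dict String Int × PySem.Dict String Int × PySem.Dict String Int) :
    ls.foldl (fun st pr => (pr.1.zip pr.2).foldl pvStepA st) st =
      (ls.flatMap (fun pr => pr.1.zip pr.2)).foldl pvStepA st := by
  induction ls generalizing st with
  | nil => rfl
  | cons pr t ih => simp [List.flatMap_cons, List.foldl_append, ih]

-- ===== VERDICT (by name: the statement is the Claim_ definition above) =====
theorem compute_metrics_for_each_entity_spec : Claim_equal_compute_metrics_for_each_entity := by
  intro predictions references _ _
  unfold Spec_compute_metrics_for_each_entity
  unfold compute_metrics_for_each_entity compute_metrics_for_each_entity_alt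
  rw [pvFoldlFlatMap, pvMain]
  simp [PySem.Dict.counter_eq_foldl, pvEnt_eq]
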